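-- pv_equiv track=rewrite | github.com/chiragpatel1229/Cryptographic-RBGs-Development-and-Analysis | Other_All_Files/CTRL Occ. of 0s and 1s.py | cal_gaps
-- ===== SOURCE A (Python) =====
-- def cal_gaps(sequence):
--     gap = []
--     gap_counter = 0
--     no_gap = 0                          # when we do not know the first bit is 1 or 0 so the condition is false
--
--     for bits in sequence:
--         if bits == 0:
--             gap_counter += 1            # calculate the number of continued zeros between two ones
--         elif bits == 1:                 # finds the 1s in a list start checking for no gaps.
--             if no_gap:                  # if there are two continued 1s in a list then append the counter
--                 gap.append(gap_counter)  # add 0s in every step with no gap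
--             gap_counter = 0             # Reset the counter
--             no_gap = 1                  # found the no_gap in the list, it is true
--     return gap
-- ===== SOURCE B (Python) =====
-- def cal_gaps(sequence):
--     # Split the sequence into segments at each 1; the zeros between
--     # consecutive ones are exactly the zeros in the interior segments.
--     groups = []
--     cur = []
--     for b in sequence:
--         if b == 1:
--             groups.append(cur)
--             cur = []
--         else:
--             cur.append(b)
--     return [g.count(0) for g in groups[1:]]
-- ===== Notes on version B (the rewrite author's own statement) =====
-- stated objective: alternative
-- what changed: Replaces A's one-pass counter-and-flag state machine with a split-at-ones decomposition: build the segments between ones, then map count(0) over the interior segments.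
import Mathlib
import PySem

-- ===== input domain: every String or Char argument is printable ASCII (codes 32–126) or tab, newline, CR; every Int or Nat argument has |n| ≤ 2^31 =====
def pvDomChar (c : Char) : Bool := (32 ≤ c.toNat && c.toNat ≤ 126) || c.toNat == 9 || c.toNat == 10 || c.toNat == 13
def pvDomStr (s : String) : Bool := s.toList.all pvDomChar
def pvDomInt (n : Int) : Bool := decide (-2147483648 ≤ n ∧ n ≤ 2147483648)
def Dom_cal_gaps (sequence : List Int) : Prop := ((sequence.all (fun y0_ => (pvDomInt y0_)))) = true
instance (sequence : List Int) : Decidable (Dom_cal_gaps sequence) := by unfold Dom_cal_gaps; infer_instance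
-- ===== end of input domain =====

-- B replaces A's one-pass counter/flag state machine with a split-at-ones decomposition
-- (build segments between ones, then count zeros in the interior segments); alternative, same cost.


-- ===== PORT A =====
-- state: (gap, gap_counter, no_gap)
def cal_gaps (sequence : List Int) : List Int :=
  (sequence.foldl
    (fun (s : List Int × Int × Bool) bits =>
      if bits = 0 then (s.1, s.2.1 + 1, s.2.2)
      else if bits = 1 then
        ((if s.2.2 then s.1 ++ [s.2.1] else s.1), 0, true)
      else s)
    ([], 0, false)).1

-- ===== PORT B =====
-- state: (groups, cur); then map count(0) over groups[1:]
def cal_gaps_alt (sequence : List Int) : List Int :=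
  (PySem.List.slice
    (sequence.foldl
      (fun (s : List (List Int) × List Int) b =>
        if b = 1 then (s.1 ++ [s.2], []) else (s.1, s.2 ++ [b]))
      ([], [])).1
    (some 1) none).map (fun g => (PySem.List.count g 0 : Int))

-- ===== PRECONDITION & SPEC =====
def Spec_cal_gaps (sequence : List Int) (out : List Int) : Prop := out = cal_gaps_alt sequence
instance (sequence : List Int) (out : List Int) : Decidable (Spec_cal_gaps sequence out) := by unfold Spec_cal_gaps; infer_instance

-- ===== CLAIM (what is proved, stated in full; the proofs are below) =====
def Claim_equal_cal_gaps : Prop := ∀ (sequence : List Int), Dom_cal_gaps sequence → Spec_cal_gaps sequence (cal_gaps sequence)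

-- ===== LEMMAS AND PROOFS =====

-- common recursive spec: zeros between consecutive ones
def gAux : List Int → Int → List Int
  | [], _ => []
  | b :: t, gc => if b = 0 then gAux t (gc + 1) else if b = 1 then gc :: gAux t 0 else gAux t gc

def hAux : List Int → List Int
  | [] => []
  | b :: t => if b = 1 then gAux t 0 else hAux t

-- segments closed by a 1 (B's fold state characterisation)
def segs : List Int → List Int → List (List Int)
  | [], _ => []
  | b :: t, cur => if b = 1 then cur :: segs t [] else segs t (cur ++ [b])

theorem foldA_true (l : List Int) (gap : List Int) (gc : Int) :
    (l.foldl
      (fun (s : List Int × Int × Bool) bits =>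
        if bits = 0 then (s.1, s.2.1 + 1, s.2.2)
        else if bits = 1 then
          ((if s.2.2 then s.1 ++ [s.2.1] else s.1), 0, true)
        else s)
      (gap, gc, true)).1 = gap ++ gAux l gc := by
  induction l generalizing gap gc with
  | nil => simp [gAux]
  | cons b t ih =>
    by_cases h0 : b = 0
    · simp [h0, gAux, ih]
    · by_cases h1 : b = 1
      · simp [h1, gAux, ih]
      · simp [h0, h1, gAux, ih]

theorem foldA_false (l : List Int) (gap : List Int) (gc : Int) :
    (l.foldl
      (fun (s : List Int × Int × Bool) bits =>
        if bits = 0 then (s.1, s.2.1 + 1, s.2.2)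
        else if bits = 1 then
          ((if s.2.2 then s.1 ++ [s.2.1] else s.1), 0, true)
        else s)
      (gap, gc, false)).1 = gap ++ hAux l := by
  induction l generalizing gap gc with
  | nil => simp [hAux]
  | cons b t ih =>
    by_cases h0 : b = 0
    · simp [h0, hAux, ih]
    · by_cases h1 : b = 1
      · simp [h1, hAux, foldA_true]
      · simp [h0, h1, hAux, ih]

theorem foldB_fst (l : List Int) (grps : List (List Int)) (cur : List Int) :
    (l.foldl
      (fun (s : List (List Int) × List Int) b =>
        if b = 1 then (s.1 ++ [s.2], []) else (s.1, s.2 ++ [b]))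
      (grps, cur)).1 = grps ++ segs l cur := by
  induction l generalizing grps cur with
  | nil => simp [segs]
  | cons b t ih =>
    by_cases h1 : b = 1
    · simp [h1, segs, ih]
    · simp [h1, segs, ih]

theorem segs_map_count (t : List Int) (cur : List Int) :
    (segs t cur).map (fun g => ((g.count 0 : Nat) : Int))
      = gAux t ((cur.count 0 : Nat) : Int) := by
  induction t generalizing cur with
  | nil => simp [segs, gAux]
  | cons b t ih =>
    by_cases h0 : b = 0
    · simp [h0, segs, gAux, ih]
    · by_cases h1 : b = 1
      · simp [h1, segs, gAux, ih]
      · simp [h0, h1, segs, gAux, ih]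

theorem segs_tail_map_count (t : List Int) (cur : List Int) :
    ((segs t cur).tail).map (fun g => ((g.count 0 : Nat) : Int)) = hAux t := by
  induction t generalizing cur with
  | nil => simp [segs, hAux]
  | cons b t ih =>
    by_cases h1 : b = 1
    · simp [h1, segs, hAux, segs_map_count]
    · simp [h1, segs, hAux, ih]

-- ===== VERDICT (by name: the statement is the Claim_ definition above) =====
theorem cal_gaps_spec : Claim_equal_cal_gaps := by
  intro sequence _
  unfold Spec_cal_gaps cal_gaps cal_gaps_alt
  rw [foldA_false, foldB_fst, PySem.List.slice_from_one]
  simp only [List.nil_append, PySem.List.count, segs_tail_map_count]
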